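-- pv_equiv track=rewrite | github.com/spustoszenie/python-50challenge | day26.py | sort_words
-- ===== SOURCE A (Python) =====
-- def sort_words(words: str):
--     unikalne = list(set(words))
--     bez_spacji = []
--     for i in unikalne:
--         if i != ' ':
--             bez_spacji.append(i)
--     posortowane = sorted(bez_spacji)
--     po_przecinku = ','.join(posortowane)
--
--     return po_przecinku
-- ===== SOURCE B (Python) =====
-- def sort_words(words: str):
--     out = []
--     prev = None
--     for c in sorted(words):
--         if c != prev:
--             prev = c
--             if c != ' ':
--                 out.append(c)
--     return ','.join(out)
-- ===== Notes on version B (the rewrite author's own statement) =====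
-- stated objective: alternative
-- what changed: B sorts the characters first and deduplicates by adjacency in the sorted order (a previous-char scan, skipping spaces), instead of building a hash set, filtering spaces, and then sorting.
import Mathlib
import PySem

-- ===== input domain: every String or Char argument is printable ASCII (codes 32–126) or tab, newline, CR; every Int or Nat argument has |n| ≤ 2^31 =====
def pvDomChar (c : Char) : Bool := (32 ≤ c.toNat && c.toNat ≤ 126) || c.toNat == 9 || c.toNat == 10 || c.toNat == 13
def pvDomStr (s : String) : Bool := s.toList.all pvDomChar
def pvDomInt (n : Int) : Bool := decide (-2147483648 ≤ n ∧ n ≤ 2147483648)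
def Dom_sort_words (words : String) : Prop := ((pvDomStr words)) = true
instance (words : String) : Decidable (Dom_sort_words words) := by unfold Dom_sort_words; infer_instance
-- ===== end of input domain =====

-- B replaces A's hash-set dedup with sort-first then adjacent-dedup (previous-char scan skipping spaces); alternative decomposition, same cost.

-- ===== PORT A =====
def sort_words (words : String) : String :=
  let unikalne : List Char := PySem.Set.ofList words.toList
  let bez_spacji : List Char :=
    unikalne.foldl (fun acc i => if i ≠ ' ' then acc ++ [i] else acc) []
  let posortowane := PySem.List.sorted bez_spacji (fun c => c) false
  String.ofList (PySem.Chars.join [','] (posortowane.map (fun c => [c])))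

-- ===== PORT B =====
def sort_words_alt (words : String) : String :=
  let st := (PySem.List.sorted words.toList (fun c => c) false).foldl
    (fun (s : List Char × Option Char) c =>
      if some c ≠ s.2 then
        (if c ≠ ' ' then s.1 ++ [c] else s.1, some c)
      else s) ([], none)
  String.ofList (PySem.Chars.join [','] (st.1.map (fun c => [c])))

-- ===== PRECONDITION & SPEC =====
def Spec_sort_words (words : String) (out : String) : Prop := out = sort_words_alt words
instance (words : String) (out : String) : Decidable (Spec_sort_words words out) := by unfold Spec_sort_words; infer_instance

-- ===== CLAIM (what is proved, stated in full; the proofs are below) =====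
def Claim_equal_sort_words : Prop := ∀ (words : String), Dom_sort_words words → Spec_sort_words words (sort_words words)

-- ===== LEMMAS AND PROOFS =====

-- The loop of B, in recursive form (proof helper).
def pvScan : Option Char → List Char → List Char
  | _, [] => []
  | prev, c :: rest =>
    if some c = prev then pvScan prev rest
    else if c = ' ' then pvScan (some c) rest
    else c :: pvScan (some c) rest

-- B's fold computes pvScan.
lemma foldl_eq_pvScan (l : List Char) (acc : List Char) (prev : Option Char) :
    (l.foldl (fun (s : List Char × Option Char) c =>
      if some c ≠ s.2 then
        (if c ≠ ' ' then s.1 ++ [c] else s.1, some c)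
      else s) (acc, prev)).1 = acc ++ pvScan prev l := by
  induction l generalizing acc prev with
  | nil => simp [pvScan]
  | cons c rest ih =>
    simp only [List.foldl]
    by_cases hcp : some c = prev
    · rw [if_neg (by simp [hcp]), pvScan, if_pos hcp, ih]
    · by_cases hsp : c = ' '
      · rw [if_pos (by simp [hcp]), if_neg (by simp [hsp]), pvScan, if_neg hcp, if_pos hsp, ih]
      · rw [if_pos (by simp [hcp]), if_pos (by simp [hsp]), pvScan, if_neg hcp, if_neg hsp, ih]
        simp

-- Membership of the scan's output, for a sorted input whose elements are all ≥ the stored previous char.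
lemma mem_pvScan (l : List Char) (prev : Option Char)
    (hl : l.Pairwise (· ≤ ·)) (hb : ∀ x ∈ l, ∀ p, prev = some p → p ≤ x) (x : Char) :
    x ∈ pvScan prev l ↔ x ∈ l ∧ x ≠ ' ' ∧ some x ≠ prev := by
  induction l generalizing prev with
  | nil => simp [pvScan]
  | cons c rest ih =>
    have hrest : rest.Pairwise (· ≤ ·) := hl.tail
    have hcle : ∀ y ∈ rest, c ≤ y := fun y hy => (List.pairwise_cons.mp hl).1 y hy
    by_cases hcp : some c = prev
    · rw [pvScan, if_pos hcp, ih prev hrest (fun y hy p hp =>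
        (Option.some.inj (hcp.trans hp)) ▸ hcle y hy)]
      constructor
      · rintro ⟨h1, h2, h3⟩; exact ⟨List.mem_cons_of_mem _ h1, h2, h3⟩
      · rintro ⟨h1, h2, h3⟩
        rcases List.mem_cons.mp h1 with rfl | h1
        · exact absurd hcp h3
        · exact ⟨h1, h2, h3⟩
    · have hne_prev : ∀ y ∈ rest, some y ≠ prev := by
        intro y hy hE
        rcases prev with _ | p
        · simp at hE
        · have hyp : y = p := Option.some.inj hE
          have hpc : p ≤ c := hb c List.mem_cons_self p rfl
          have hpc' : p < c := lt_of_le_of_ne hpc (fun h => hcp (by rw [h]))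
          exact absurd (hyp ▸ hcle y hy) (not_le.mpr hpc')
      have hb' : ∀ y ∈ rest, ∀ p, some c = some p → p ≤ y := by
        rintro y hy p hp; exact (Option.some.inj hp) ▸ hcle y hy
      by_cases hsp : c = ' '
      · rw [pvScan, if_neg hcp, if_pos hsp, ih (some c) hrest hb']
        constructor
        · rintro ⟨h1, h2, h3⟩; exact ⟨List.mem_cons_of_mem _ h1, h2, hne_prev x h1⟩
        · rintro ⟨h1, h2, h3⟩
          rcases List.mem_cons.mp h1 with rfl | h1
          · exact absurd hsp h2
          · exact ⟨h1, h2, fun hE => h2 ((Option.some.inj hE).trans hsp)⟩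
      · rw [pvScan, if_neg hcp, if_neg hsp]
        rw [List.mem_cons, ih (some c) hrest hb']
        constructor
        · rintro (rfl | ⟨h1, h2, h3⟩)
          · exact ⟨List.mem_cons_self, hsp, hcp⟩
          · exact ⟨List.mem_cons_of_mem _ h1, h2, hne_prev x h1⟩
        · rintro ⟨h1, h2, h3⟩
          rcases List.mem_cons.mp h1 with rfl | h1
          · exact Or.inl rfl
          · by_cases hxc : x = c
            · exact Or.inl hxc
            · exact Or.inr ⟨h1, h2, fun hE => hxc (Option.some.inj hE)⟩

lemma pairwise_pvScan (l : List Char) (prev : Option Char)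
    (hl : l.Pairwise (· ≤ ·)) (hb : ∀ x ∈ l, ∀ p, prev = some p → p ≤ x) :
    (pvScan prev l).Pairwise (· < ·) := by
  induction l generalizing prev with
  | nil => simp [pvScan]
  | cons c rest ih =>
    have hrest : rest.Pairwise (· ≤ ·) := hl.tail
    have hcle : ∀ y ∈ rest, c ≤ y := fun y hy => (List.pairwise_cons.mp hl).1 y hy
    have hb' : ∀ y ∈ rest, ∀ p, some c = some p → p ≤ y := by
      rintro y hy p hp; exact (Option.some.inj hp) ▸ hcle y hy
    by_cases hcp : some c = prev
    · rw [pvScan, if_pos hcp]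
      exact ih prev hrest (fun y hy p hp => hb y (List.mem_cons_of_mem _ hy) p hp)
    · by_cases hsp : c = ' '
      · rw [pvScan, if_neg hcp, if_pos hsp]
        exact ih (some c) hrest hb'
      · rw [pvScan, if_neg hcp, if_neg hsp]
        refine List.pairwise_cons.mpr ⟨?_, ih (some c) hrest hb'⟩
        intro y hy
        have := (mem_pvScan rest (some c) hrest hb' y).mp hy
        exact lt_of_le_of_ne (hcle y this.1) (fun h => this.2.2 (by rw [h]))

lemma pvScan_eq_sorted (words : String) :
    PySem.List.sorted
      ((PySem.Set.ofList words.toList).foldl (fun acc i => if i ≠ ' ' then acc ++ [i] else acc) [])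
      (fun c => c) false
    = pvScan none (PySem.List.sorted words.toList (fun c => c) false) := by
  set S := PySem.List.sorted words.toList (fun c => c) false with hS
  have hSp : S.Pairwise (· ≤ ·) := by
    simpa using PySem.List.sorted_pairwise words.toList (fun c => c)
  have hbez : (PySem.Set.ofList words.toList).foldl
      (fun acc i => if i ≠ ' ' then acc ++ [i] else acc) []
      = (PySem.Set.ofList words.toList).filter (fun i => decide (i ≠ ' ')) := by
    simpa using PySem.List.foldl_append_ite_eq_filter (l := PySem.Set.ofList words.toList)
      (p := fun i => i ≠ ' ') (acc := [])
  rw [hbez]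
  apply PySem.List.sorted_eq_of_perm_of_pairwise_lt
  · -- permutation: both are nodup with the same members
    have hmemL : ∀ x, x ∈ pvScan none S ↔ x ∈ words.toList ∧ x ≠ ' ' := by
      intro x
      rw [mem_pvScan S none hSp (by rintro _ _ _ ⟨⟩)]
      simp [hS, PySem.List.mem_sorted]
    have hnodL : (pvScan none S).Nodup :=
      (pairwise_pvScan S none hSp (by rintro _ _ _ ⟨⟩)).imp ne_of_lt
    have hnodR : ((PySem.Set.ofList words.toList).filter (fun i => decide (i ≠ ' '))).Nodup :=
      (PySem.Set.nodup_ofList words.toList).filter _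
    rw [List.perm_ext_iff_of_nodup hnodL hnodR]
    intro x
    rw [hmemL]
    simp [List.mem_filter, PySem.Set.mem_ofList]
  · simpa using pairwise_pvScan S none hSp (by rintro _ _ _ ⟨⟩)

-- ===== VERDICT (by name: the statement is the Claim_ definition above) =====
theorem sort_words_spec : Claim_equal_sort_words := by
  intro words _
  unfold Spec_sort_words sort_words sort_words_alt
  simp only []
  rw [foldl_eq_pvScan, List.nil_append, pvScan_eq_sorted words]
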